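-- pv_equiv track=rewrite | github.com/dazc/pwanalysis | pwAnalysis.py | segVal
-- ===== SOURCE A (Python) =====
-- def segVal(list_jumble):
--     list_mirror = list_jumble.copy()
--     for i in list_mirror:
--         if not (i.isalpha() or i.isdigit()):
--             list_jumble.append(
--                 list_jumble.pop(
--                     list_jumble.index(i)))
--     return list_jumble
-- ===== SOURCE B (Python) =====
-- def segVal(list_jumble):
--     keep = [x for x in list_jumble if x.isalpha() or x.isdigit()]
--     moved = [x for x in list_jumble if not (x.isalpha() or x.isdigit())]
--     list_jumble[:] = keep + moved
--     return list_jumble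
-- ===== Notes on version B (the rewrite author's own statement) =====
-- stated objective: simpler
-- what changed: Replaced the index/pop element-moving loop (a linear index scan plus pop per non-alnum element) with two filter comprehensions concatenated (stable partition), reassigned in place via list_jumble[:] = ...
import Mathlib
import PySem

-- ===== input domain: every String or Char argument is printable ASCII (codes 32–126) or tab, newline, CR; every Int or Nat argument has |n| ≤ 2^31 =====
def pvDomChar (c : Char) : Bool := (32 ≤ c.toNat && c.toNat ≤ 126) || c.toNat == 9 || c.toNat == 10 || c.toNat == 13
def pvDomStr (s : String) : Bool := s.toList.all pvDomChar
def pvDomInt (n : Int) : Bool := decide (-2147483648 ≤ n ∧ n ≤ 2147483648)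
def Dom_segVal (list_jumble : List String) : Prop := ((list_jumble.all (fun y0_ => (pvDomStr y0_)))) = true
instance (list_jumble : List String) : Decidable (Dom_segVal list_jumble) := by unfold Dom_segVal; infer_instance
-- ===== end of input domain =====

-- B replaces A's quadratic index/pop moving loop with two filters concatenated (simpler);
-- both A and B mutate the argument list in place in Python — the equivalence proved here is about the return value.

-- s.isalpha() or s.isdigit()
def pvAln (s : String) : Bool := PySem.Str.strIsalpha s || PySem.Str.strIsdigit s

-- ===== PORT A =====
-- one iteration of A's loop body, state = current list_jumble
def segValStep (xs : List String) (i : String) : List String :=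
  if !(pvAln i) then
    match PySem.List.index? xs i with
    | some k =>
      match PySem.List.pop? xs (k : Int) with
      | some (v, rest) => rest ++ [v]
      | none => xs      -- unreachable totality guard (index is in range)
    | none => xs        -- unreachable totality guard (i is in xs)
  else xs

def segVal (list_jumble : List String) : List String :=
  list_jumble.foldl segValStep list_jumble

-- ===== PORT B =====
def segVal_alt (list_jumble : List String) : List String :=
  list_jumble.filter (fun x => pvAln x) ++ list_jumble.filter (fun x => !(pvAln x))

-- ===== PRECONDITION & SPEC =====
def Spec_segVal (list_jumble : List String) (out : List String) : Prop := out = segVal_alt list_jumble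
instance (list_jumble : List String) (out : List String) : Decidable (Spec_segVal list_jumble out) := by unfold Spec_segVal; infer_instance

-- ===== CLAIM (what is proved, stated in full; the proofs are below) =====
def Claim_equal_segVal : Prop := ∀ (list_jumble : List String), Dom_segVal list_jumble → Spec_segVal list_jumble (segVal list_jumble)

-- ===== LEMMAS AND PROOFS =====

theorem index_skip (F : List String) (i : String) (rest : List String) (h : i ∉ F) :
    PySem.List.index? (F ++ i :: rest) i = some F.length := by
  rw [PySem.List.index?_eq_some_iff]
  exact ⟨F, rest, rfl, rfl, h⟩

theorem pop_at_index (F : List String) (i : String) (rest : List String) :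
    PySem.List.pop? (F ++ i :: rest) (F.length : Int) = some (i, F ++ rest) := by
  have hlt : F.length < (F ++ i :: rest).length := by simp
  rw [PySem.List.pop?_natCast _ _ hlt]
  congr 1
  have h1 : (F ++ i :: rest)[F.length] = i := by
    simp [List.getElem_append_right]
  have h2 : (F ++ i :: rest).eraseIdx F.length = F ++ rest := by
    induction F with
    | nil => simp
    | cons x F ih => simp [List.eraseIdx_cons_succ, ih]
  rw [h1, h2]

theorem segVal_inv (q p : List String) :
    List.foldl segValStep
      (p.filter (fun x => pvAln x) ++ q ++ p.filter (fun x => !(pvAln x))) q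
    = (p ++ q).filter (fun x => pvAln x) ++ (p ++ q).filter (fun x => !(pvAln x)) := by
  induction q generalizing p with
  | nil => simp
  | cons i q' ih =>
    rw [List.foldl_cons]
    by_cases hi : pvAln i = true
    · have hstep : segValStep
          (p.filter (fun x => pvAln x) ++ (i :: q') ++ p.filter (fun x => !(pvAln x))) i
          = p.filter (fun x => pvAln x) ++ (i :: q') ++ p.filter (fun x => !(pvAln x)) := by
        simp [segValStep, hi]
      rw [hstep]
      have := ih (p ++ [i])
      simp only [List.filter_append, List.filter_cons, hi, List.filter_nil] at this ⊢
      simpa [List.append_assoc] using this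
    · have hnot : i ∉ p.filter (fun x => pvAln x) := by
        intro hmem
        exact hi (List.of_mem_filter hmem)
      have hstep : segValStep
          (p.filter (fun x => pvAln x) ++ (i :: q') ++ p.filter (fun x => !(pvAln x))) i
          = p.filter (fun x => pvAln x) ++ q' ++ (p.filter (fun x => !(pvAln x)) ++ [i]) := by
        simp only [segValStep, hi, Bool.not_false, if_true, List.append_assoc, List.cons_append,
          index_skip _ _ _ hnot, pop_at_index]
      rw [hstep]
      have := ih (p ++ [i])
      simp only [List.filter_append, List.filter_cons, hi, List.filter_nil] at this ⊢
      simpa [List.append_assoc, hi] using this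

-- ===== VERDICT (by name: the statement is the Claim_ definition above) =====
theorem segVal_spec : Claim_equal_segVal := by
  intro l _
  show segVal l = segVal_alt l
  have := segVal_inv l []
  simpa [segVal, segVal_alt] using this
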